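-- pv_equiv track=rewrite | github.com/tofan79/apps-auto-clipper | services/ai_engine/output_distributor.py | distribute_output_modes
-- ===== SOURCE A (Python) =====
-- def distribute_output_modes(total_clips: int) -> list[str]:
--     """
--     Returns mode assignments with default portrait:landscape ratio ~= 2:1.
--     """
--     if total_clips <= 0:
--         return []
--
--     modes: list[str] = []
--     pattern = ["portrait", "portrait", "landscape"]
--     while len(modes) < total_clips:
--         modes.extend(pattern)
--     return modes[:total_clips]
-- ===== SOURCE B (Python) =====
-- def distribute_output_modes(total_clips: int) -> list[str]:
--     # Map each clip index directly to its mode: every third clip (index 2 mod 3)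
--     # is landscape; range() is empty for non-positive counts.
--     return ["landscape" if i % 3 == 2 else "portrait" for i in range(total_clips)]
-- ===== Notes on version B (the rewrite author's own statement) =====
-- stated objective: idiomatic
-- what changed: Replaces the build-then-truncate while loop (repeatedly extending a 3-element pattern list past the target length and slicing it back) with a closed-form per-index mapping: a single comprehension over range(total_clips) assigning 'landscape' exactly when i % 3 == 2.
import Mathlib
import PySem

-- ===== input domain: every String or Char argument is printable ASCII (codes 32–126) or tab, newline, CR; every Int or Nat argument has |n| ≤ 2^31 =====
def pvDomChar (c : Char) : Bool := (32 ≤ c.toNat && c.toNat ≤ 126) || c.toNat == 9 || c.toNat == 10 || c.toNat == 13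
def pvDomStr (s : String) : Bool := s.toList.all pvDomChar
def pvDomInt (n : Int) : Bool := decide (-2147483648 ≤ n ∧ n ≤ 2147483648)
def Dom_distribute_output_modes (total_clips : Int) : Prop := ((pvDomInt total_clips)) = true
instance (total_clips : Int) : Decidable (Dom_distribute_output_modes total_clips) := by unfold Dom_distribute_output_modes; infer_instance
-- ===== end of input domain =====

-- B replaces A's build-then-truncate while loop with a per-index modular mapping (idiomatic, same cost).

-- ===== PORT A =====
-- pattern = ["portrait", "portrait", "landscape"]
def pvPattern : List String := ["portrait", "portrait", "landscape"]

-- while len(modes) < total_clips: modes.extend(pattern)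
def pvLoop (total : Int) (modes : List String) : List String :=
  if (modes.length : Int) < total then pvLoop total (modes ++ pvPattern) else modes
termination_by (total - modes.length).toNat
decreasing_by
  simp only [List.length_append]
  have : (pvPattern.length : Int) = 3 := by decide
  omega

def distribute_output_modes (total_clips : Int) : List String :=
  if total_clips ≤ 0 then []
  else PySem.List.slice (pvLoop total_clips []) none (some total_clips)

-- ===== PORT B =====
def distribute_output_modes_alt (total_clips : Int) : List String :=
  (PySem.List.pyRange 0 total_clips 1).map
    (fun i => if PySem.Int.mod i 3 == 2 then "landscape" else "portrait")

-- ===== PRECONDITION & SPEC =====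
def Spec_distribute_output_modes (total_clips : Int) (out : List String) : Prop := out = distribute_output_modes_alt total_clips
instance (total_clips : Int) (out : List String) : Decidable (Spec_distribute_output_modes total_clips out) := by unfold Spec_distribute_output_modes; infer_instance

-- ===== CLAIM (what is proved, stated in full; the proofs are below) =====
def Claim_equal_distribute_output_modes : Prop := ∀ (total_clips : Int), Dom_distribute_output_modes total_clips → Spec_distribute_output_modes total_clips (distribute_output_modes total_clips)

-- ===== LEMMAS AND PROOFS =====

-- the canonical mode of clip index k
def pvMode (k : Nat) : String := if k % 3 == 2 then "landscape" else "portrait"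

-- m concatenated copies of the pattern
def pvRep (m : Nat) : List String := (List.replicate m pvPattern).flatten

theorem pvRep_succ (m : Nat) : pvRep (m + 1) = pvRep m ++ pvPattern := by
  simp [pvRep, List.replicate_succ']

theorem pvRep_length (m : Nat) : (pvRep m).length = 3 * m := by
  induction m with
  | zero => rfl
  | succ m ih => rw [pvRep_succ]; simp [ih, pvPattern]; omega

theorem pvRep_eq_map (m : Nat) : pvRep m = (List.range (3 * m)).map pvMode := by
  induction m with
  | zero => rfl
  | succ m ih =>
    rw [pvRep_succ, ih]
    have h3 : 3 * (m + 1) = (3 * m + 1 + 1) + 1 := by ring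
    rw [h3, List.range_succ, List.range_succ, List.range_succ]
    simp only [List.map_append, List.map_cons, List.map_nil, List.append_assoc]
    congr 1
    have e0 : pvMode (3 * m) = "portrait" := by
      simp [pvMode, Nat.mul_mod_right]
    have e1 : pvMode (3 * m + 1) = "portrait" := by
      have : (3 * m + 1) % 3 = 1 := by omega
      simp [pvMode, this]
    have e2 : pvMode (3 * m + 1 + 1) = "landscape" := by
      have : (3 * m + 1 + 1) % 3 = 2 := by omega
      simp [pvMode, this]
    simp [e0, e1, e2, pvPattern]

-- the while loop, started from a whole number of pattern copies, ends at a
-- whole number of copies whose total length is at least the target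
theorem pvLoop_rep (total : Int) :
    ∀ k : Nat, ∃ m : Nat, total ≤ 3 * m ∧ pvLoop total (pvRep k) = pvRep m := by
  intro k
  by_cases h : ((pvRep k).length : Int) < total
  · have hlen : ((pvRep k).length : Int) = 3 * k := by rw [pvRep_length]; push_cast; ring
    have : (total - (pvRep (k+1)).length).toNat < (total - (pvRep k).length).toNat := by
      rw [pvRep_length, pvRep_length]; omega
    obtain ⟨m, hm, heq⟩ := pvLoop_rep total (k + 1)
    refine ⟨m, hm, ?_⟩
    rw [pvLoop, if_pos h, ← pvRep_succ, heq]
  · refine ⟨k, ?_, ?_⟩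
    · rw [pvRep_length] at h; omega
    · rw [pvLoop, if_neg h]
termination_by k => (total - (pvRep k).length).toNat

theorem alt_eq_map (total : Int) :
    distribute_output_modes_alt total = (List.range total.toNat).map pvMode := by
  unfold distribute_output_modes_alt
  rw [PySem.List.pyRange_one]
  rw [List.map_map]
  simp only [sub_zero]
  apply List.map_congr_left
  intro k hk
  simp only [List.mem_range] at hk
  simp only [Function.comp, zero_add]
  have : PySem.Int.mod (k : Int) 3 = ((k % 3 : Nat) : Int) := by
    exact_mod_cast PySem.Int.mod_natCast k 3
  simp only [this, pvMode]
  have hk3 : k % 3 = 0 ∨ k % 3 = 1 ∨ k % 3 = 2 := by omega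
  rcases hk3 with h | h | h <;> simp [h]

-- ===== VERDICT (by name: the statement is the Claim_ definition above) =====
theorem distribute_output_modes_spec : Claim_equal_distribute_output_modes := by
  intro total _
  unfold Spec_distribute_output_modes distribute_output_modes
  rw [alt_eq_map]
  by_cases h : total ≤ 0
  · rw [if_pos h]
    have : total.toNat = 0 := by omega
    simp [this]
  · rw [if_neg h]
    obtain ⟨m, hm, heq⟩ := pvLoop_rep total 0
    have h0 : pvRep 0 = [] := rfl
    rw [← h0, heq, pvRep_eq_map]
    rw [PySem.List.slice_to _ (by omega)]
    rw [← List.map_take, List.take_range]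
    congr 1
    congr 1
    omega
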